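-- pv_equiv track=rewrite | github.com/Born2BSalty/WeiDU_Log_Builder | src/wlb/ui/step2/compat_rules.py | _parse_basic_yaml
-- ===== SOURCE A (Python) =====
-- def _parse_basic_yaml(text: str) -> list[dict[str, str]]:
--     rules: list[dict[str, str]] = []
--     current: dict[str, str] | None = None
--     for raw in text.splitlines():
--         line = raw.strip()
--         if not line or line.startswith("#"):
--             continue
--         if line.startswith("-"):
--             current = {}
--             rules.append(current)
--             line = line[1:].strip()
--             if not line:
--                 continue
--         if ":" in line and current is not None:
--             key, value = line.split(":", 1)
--             current[key.strip()] = value.strip().strip('"').strip("'")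
--     return rules
-- ===== SOURCE B (Python) =====
-- def _parse_basic_yaml(text: str) -> list[dict[str, str]]:
--     # Phase 1: clean lines, then group into blocks, one block per leading dash line.
--     clean = [s for s in (raw.strip() for raw in text.splitlines())
--              if s and not s.startswith("#")]
--     blocks: list[list[str]] = []
--     for ln in clean:
--         if ln.startswith("-"):
--             blocks.append([ln[1:].strip()])
--         elif blocks:
--             blocks[-1].append(ln)
--
--     # Phase 2: each block independently becomes one dict.
--     def parse_block(block: list[str]) -> dict[str, str]:
--         d: dict[str, str] = {}
--         for ln in block:
--             if ":" in ln:
--                 key, value = ln.split(":", 1)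
--                 d[key.strip()] = value.strip().strip('"').strip("'")
--         return d
--
--     return [parse_block(b) for b in blocks]
-- ===== Notes on version B (the rewrite author's own statement) =====
-- stated objective: alternative
-- what changed: Replaces A's single stateful pass (which mutates an aliased 'current' dict inside the result list) by a two-phase pipeline: first group cleaned lines into blocks starting at dash lines, then map each block independently to a dict.
import Mathlib
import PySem

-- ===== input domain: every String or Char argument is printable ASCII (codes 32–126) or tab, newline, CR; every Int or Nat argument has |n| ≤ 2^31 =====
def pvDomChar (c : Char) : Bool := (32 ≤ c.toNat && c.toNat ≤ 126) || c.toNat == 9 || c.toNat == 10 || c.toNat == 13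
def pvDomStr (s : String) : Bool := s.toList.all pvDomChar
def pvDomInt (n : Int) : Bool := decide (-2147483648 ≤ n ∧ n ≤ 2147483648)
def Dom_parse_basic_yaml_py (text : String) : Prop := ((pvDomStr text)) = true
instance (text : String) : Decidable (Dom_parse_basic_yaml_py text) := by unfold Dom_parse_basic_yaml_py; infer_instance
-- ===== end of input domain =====

-- B replaces A's single stateful pass (aliased 'current' dict) by a two-phase
-- group-into-blocks-then-parse-each-block pipeline (blocks split at dash lines); alternative decomposition, same cost.

-- ===== PORT A =====
-- state: (rules without the aliased current dict, the current dict if any);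
-- Python's aliasing 'rules.append(current)' is modelled by keeping current apart
-- and re-attaching it at the end / when a new '-' starts a fresh dict.
def pvA_kv (st : List (PySem.Dict String String) × Option (PySem.Dict String String))
    (line : String) : List (PySem.Dict String String) × Option (PySem.Dict String String) :=
  if PySem.Str.isIn ":" line then
    match st.2 with
    | some cur =>
        match PySem.Str.splitMax? line ":" 1 with
        | some [key, value] =>
            (st.1, some (cur.insert (PySem.Str.strip key)
              (PySem.Str.stripChars (PySem.Str.stripChars (PySem.Str.strip value) "\"") "'")))
        | _ => st
    | none => st
  else st

def pvA_step (st : List (PySem.Dict String String) × Option (PySem.Dict String String))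
    (raw : String) : List (PySem.Dict String String) × Option (PySem.Dict String String) :=
  let line := PySem.Str.strip raw
  if line == "" || PySem.Str.startswith line "#" then st
  else if PySem.Str.startswith line "-" then
    let st' := (st.1 ++ st.2.toList, some (PySem.Dict.empty : PySem.Dict String String))
    let line := PySem.Str.strip (PySem.Str.slice line (some 1) none)
    if line == "" then st' else pvA_kv st' line
  else pvA_kv st line

def parse_basic_yaml_py (text : String) : List (List (String × String)) :=
  let st := (PySem.Str.splitlines text).foldl pvA_step ([], none)
  (st.1 ++ st.2.toList).map PySem.Dict.items

-- ===== PORT B =====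
def pvB_clean (text : String) : List String :=
  ((PySem.Str.splitlines text).map PySem.Str.strip).filter
    (fun ln => !(ln == "" || PySem.Str.startswith ln "#"))

def pvB_addLine (blocks : List (List String)) (ln : String) : List (List String) :=
  if PySem.Str.startswith ln "-" then
    blocks ++ [[PySem.Str.strip (PySem.Str.slice ln (some 1) none)]]
  else
    match blocks with
    | [] => []
    | _ => blocks.dropLast ++ [blocks.getLast! ++ [ln]]

def pvB_kvLine (d : PySem.Dict String String) (ln : String) : PySem.Dict String String :=
  if PySem.Str.isIn ":" ln then
    match PySem.Str.splitMax? ln ":" 1 with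
    | some [key, value] =>
        d.insert (PySem.Str.strip key)
          (PySem.Str.stripChars (PySem.Str.stripChars (PySem.Str.strip value) "\"") "'")
    | _ => d
  else d

def pvB_parseBlock (block : List String) : List (String × String) :=
  (block.foldl pvB_kvLine PySem.Dict.empty).items

def parse_basic_yaml_py_alt (text : String) : List (List (String × String)) :=
  ((pvB_clean text).foldl pvB_addLine []).map pvB_parseBlock

-- ===== PRECONDITION & SPEC =====
def Spec_parse_basic_yaml_py (text : String) (out : List (List (String × String))) : Prop := out = parse_basic_yaml_py_alt text
instance (text : String) (out : List (List (String × String))) : Decidable (Spec_parse_basic_yaml_py text out) := by unfold Spec_parse_basic_yaml_py; infer_instance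

-- ===== CLAIM (what is proved, stated in full; the proofs are below) =====
def Claim_equal_parse_basic_yaml_py : Prop := ∀ (text : String), Dom_parse_basic_yaml_py text → Spec_parse_basic_yaml_py text (parse_basic_yaml_py text)

-- ===== LEMMAS AND PROOFS =====

/-- The dict built from a block of lines. -/
def pvDictOf (b : List String) : PySem.Dict String String := b.foldl pvB_kvLine PySem.Dict.empty

/-- A's loop state read off from B's block list. -/
def pvStateOf (blocks : List (List String)) :
    List (PySem.Dict String String) × Option (PySem.Dict String String) :=
  (blocks.dropLast.map pvDictOf, blocks.getLast?.map pvDictOf)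

theorem pvA_kv_none (a : List (PySem.Dict String String)) (ln : String) :
    pvA_kv (a, none) ln = (a, none) := by
  unfold pvA_kv; split <;> rfl

theorem pvA_kv_some (a : List (PySem.Dict String String)) (d : PySem.Dict String String)
    (ln : String) : pvA_kv (a, some d) ln = (a, some (pvB_kvLine d ln)) := by
  unfold pvA_kv pvB_kvLine
  split
  · dsimp only; split <;> rfl
  · rfl

theorem pvB_kvLine_empty_str (d : PySem.Dict String String) : pvB_kvLine d "" = d := by
  have h : PySem.Str.isIn ":" "" = false := by decide
  unfold pvB_kvLine
  rw [h]
  simp only [Bool.false_eq_true, if_false]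

theorem pv_flatten (blocks : List (List String)) :
    (pvStateOf blocks).1 ++ (pvStateOf blocks).2.toList = blocks.map pvDictOf := by
  rcases List.eq_nil_or_concat blocks with h | ⟨bs, b, h⟩ <;> subst h <;> simp [pvStateOf]

theorem pv_stateOf_concat (bs : List (List String)) (b : List String) :
    pvStateOf (bs ++ [b]) = (bs.map pvDictOf, some (pvDictOf b)) := by
  simp [pvStateOf]

theorem pv_addLine_dash (blocks : List (List String)) (ln : String)
    (hd : PySem.Str.startswith ln "-" = true) :
    pvB_addLine blocks ln
      = blocks ++ [[PySem.Str.strip (PySem.Str.slice ln (some 1) none)]] := by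
  unfold pvB_addLine
  rw [hd]
  simp only [if_true]

theorem pv_addLine_nodash (bs : List (List String)) (b : List String) (ln : String)
    (hd : PySem.Str.startswith ln "-" = false) :
    pvB_addLine (bs ++ [b]) ln = bs ++ [b ++ [ln]] := by
  unfold pvB_addLine
  rw [hd]
  simp only [Bool.false_eq_true, if_false]
  cases bs with
  | nil => rfl
  | cons h t =>
      simp only [List.cons_append]
      simp only [List.getLast!]
      simp only [← List.cons_append, List.dropLast_concat]
      simp

theorem pvA_step_skip (st : List (PySem.Dict String String) × Option (PySem.Dict String String))
    (raw : String)
    (hk : (PySem.Str.strip raw == "" || PySem.Str.startswith (PySem.Str.strip raw) "#") = true) :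
    pvA_step st raw = st := by
  unfold pvA_step
  simp only [hk, if_true]

theorem pvDictOf_singleton (x : String) : pvDictOf [x] = pvB_kvLine PySem.Dict.empty x := by
  simp [pvDictOf]

/-- One kept line advances A's state exactly as B's block builder. -/
theorem pvA_step_keep (blocks : List (List String)) (raw : String)
    (hk : (PySem.Str.strip raw == "" || PySem.Str.startswith (PySem.Str.strip raw) "#") = false) :
    pvA_step (pvStateOf blocks) raw = pvStateOf (pvB_addLine blocks (PySem.Str.strip raw)) := by
  unfold pvA_step
  simp only [hk, Bool.false_eq_true, if_false]
  by_cases hd : PySem.Str.startswith (PySem.Str.strip raw) "-"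
  · simp only [hd, if_true]
    rw [pv_addLine_dash _ _ hd, pv_stateOf_concat]
    by_cases he : PySem.Str.strip (PySem.Str.slice (PySem.Str.strip raw) (some 1) none) == ""
    · have he' : PySem.Str.strip (PySem.Str.slice (PySem.Str.strip raw) (some 1) none) = "" :=
        by simpa using he
      simp only [he, if_true]
      rw [pv_flatten, he', pvDictOf_singleton, pvB_kvLine_empty_str]
    · simp only [he, Bool.false_eq_true, if_false]
      rw [pvA_kv_some, pv_flatten, pvDictOf_singleton]
  · simp only [hd, Bool.false_eq_true, if_false]
    have hd' : PySem.Str.startswith (PySem.Str.strip raw) "-" = false := by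
      simpa using hd
    rcases List.eq_nil_or_concat blocks with h | ⟨bs, b, h⟩ <;> subst h
    · have hb : pvB_addLine [] (PySem.Str.strip raw) = [] := by
        unfold pvB_addLine
        rw [hd']
        simp only [Bool.false_eq_true, if_false]
      rw [hb]
      exact pvA_kv_none _ _
    · simp only [List.concat_eq_append]
      rw [pv_stateOf_concat, pvA_kv_some, pv_addLine_nodash _ _ _ hd', pv_stateOf_concat]
      simp only [pvDictOf, List.foldl_append, List.foldl_cons, List.foldl_nil]

/-- A's fold over the raw lines tracks B's block fold over the cleaned lines. -/
theorem pv_main (ls : List String) (blocks : List (List String)) :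
    ls.foldl pvA_step (pvStateOf blocks)
      = pvStateOf ((ls.map PySem.Str.strip).filter
          (fun ln => !(ln == "" || PySem.Str.startswith ln "#")) |>.foldl pvB_addLine blocks) := by
  induction ls generalizing blocks with
  | nil => rfl
  | cons raw rest ih =>
      simp only [List.foldl_cons, List.map_cons, List.filter_cons]
      by_cases hk : (PySem.Str.strip raw == "" || PySem.Str.startswith (PySem.Str.strip raw) "#") = true
      · rw [pvA_step_skip _ _ hk]
        simp only [hk, Bool.not_true, Bool.false_eq_true, if_false]
        exact ih blocks
      · have hk' : (PySem.Str.strip raw == "" || PySem.Str.startswith (PySem.Str.strip raw) "#") = false := by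
          simpa using hk
        rw [pvA_step_keep _ _ hk']
        simp only [hk', Bool.not_false, if_true, List.foldl_cons]
        exact ih (pvB_addLine blocks (PySem.Str.strip raw))

-- ===== VERDICT (by name: the statement is the Claim_ definition above) =====
theorem parse_basic_yaml_py_spec : Claim_equal_parse_basic_yaml_py := by
  intro text _
  unfold Spec_parse_basic_yaml_py parse_basic_yaml_py parse_basic_yaml_py_alt pvB_clean
  dsimp only
  have h0 : (([], none) : List (PySem.Dict String String) × Option (PySem.Dict String String))
      = pvStateOf [] := rfl
  rw [h0, pv_main]
  generalize ((((PySem.Str.splitlines text).map PySem.Str.strip).filter _).foldl pvB_addLine []) = blocks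
  simp only [pv_flatten, List.map_map]
  rfl
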